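-- pv_equiv track=rewrite | github.com/naemoo/Algorithm-Python | BinarySearch/Problem17.py | upper
-- ===== SOURCE A (Python) =====
-- def upper(arr, target):
--     l, r = 0, len(arr)
--     while l < r:
--         mid = (l + r) // 2
--         if arr[mid] <= target:
--             l = mid + 1
--         else:
--             r = mid
--     return r
-- ===== SOURCE B (Python) =====
-- def upper(arr, target):
--     def go(base, size):
--         if size == 0:
--             return base
--         half = size // 2
--         if arr[base + half] <= target:
--             return go(base + half + 1, size - half - 1)
--         return go(base, half)
--     return go(0, len(arr))
-- ===== Notes on version B (the rewrite author's own statement) =====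
-- stated objective: alternative
-- what changed: A's iterative while-loop over a pair of bounds (l, r), returning r, is replaced by a recursive search over an (offset, width) representation of the interval: go(base, size) probes arr[base + size//2] and recurses on the left half's width or the right half's offset and width, returning base at width 0; the probe positions coincide with A's because (l+r)//2 = l + (r-l)//2.
import Mathlib
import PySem

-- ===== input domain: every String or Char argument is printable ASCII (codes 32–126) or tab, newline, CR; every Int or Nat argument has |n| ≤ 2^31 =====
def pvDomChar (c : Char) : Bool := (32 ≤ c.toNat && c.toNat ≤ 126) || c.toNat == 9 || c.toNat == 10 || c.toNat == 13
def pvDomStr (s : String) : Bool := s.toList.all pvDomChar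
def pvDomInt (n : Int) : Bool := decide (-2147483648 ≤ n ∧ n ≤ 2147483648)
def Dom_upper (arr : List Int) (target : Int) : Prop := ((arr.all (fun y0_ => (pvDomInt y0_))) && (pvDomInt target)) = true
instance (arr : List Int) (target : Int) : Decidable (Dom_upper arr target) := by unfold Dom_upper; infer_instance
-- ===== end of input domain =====

-- B replaces A's iterative two-bound (l, r) loop (returning r) by a recursive search
-- over an (offset, width) representation of the interval (returning the offset at
-- width 0); the probed indices coincide, so the return value is identical.

-- ===== PORT A =====
-- the while-loop of A, as well-founded recursion on the interval width (r - l)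
def upperLoop (arr : List Int) (target : Int) (l r : Int) : Int :=
  if h : l < r then
    let mid := PySem.Int.floordiv (l + r) 2
    -- arr[mid] is always in range on A's reachable states; unreachable none defaults to 0
    if (PySem.List.pyGet? arr mid).getD 0 ≤ target then
      upperLoop arr target (mid + 1) r
    else
      upperLoop arr target l mid
  else r
termination_by (r - l).toNat
decreasing_by
  · have := (PySem.Int.floordiv_two_mid_bounds (le_of_lt h)).1
    omega
  · have h2 : PySem.Int.floordiv (l + r) 2 < r := by
      have := PySem.Int.floordiv_eq_ediv_of_pos (a := l + r) (b := 2) (by omega)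
      omega
    omega

def upper (arr : List Int) (target : Int) : Int :=
  upperLoop arr target 0 (arr.length : Int)

-- ===== PORT B =====
-- B's helper go(base, size): structural descent on the width 'size'
def upperGo (arr : List Int) (target : Int) (base : Int) (size : Nat) : Int :=
  if size = 0 then base
  else
    let half := size / 2
    if (PySem.List.pyGet? arr (base + (half : Int))).getD 0 ≤ target then
      upperGo arr target (base + (half : Int) + 1) (size - half - 1)
    else
      upperGo arr target base half
termination_by size
decreasing_by
  · omega
  · omega

def upper_alt (arr : List Int) (target : Int) : Int :=
  upperGo arr target 0 arr.length

-- ===== PRECONDITION & SPEC =====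
def Spec_upper (arr : List Int) (target : Int) (out : Int) : Prop := out = upper_alt arr target
instance (arr : List Int) (target : Int) (out : Int) : Decidable (Spec_upper arr target out) := by unfold Spec_upper; infer_instance

-- ===== CLAIM (what is proved, stated in full; the proofs are below) =====
def Claim_equal_upper : Prop := ∀ (arr : List Int) (target : Int), Dom_upper arr target → Spec_upper arr target (upper arr target)

-- ===== LEMMAS AND PROOFS =====
-- A's state (l, r) corresponds to B's state (base, size) via l = base, r = base + size;
-- the probed index agrees because (2*base + size) // 2 = base + size / 2; induction on size.
theorem upperLoop_eq_upperGo (arr : List Int) (target : Int) :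
    ∀ (size : Nat) (base : Int), upperLoop arr target base (base + (size : Int)) = upperGo arr target base size := by
  intro size
  induction size using Nat.strong_induction_on with
  | _ size ih =>
    intro base
    rw [upperLoop, upperGo]
    by_cases hz : size = 0
    · simp [hz]
    · have hlt : base < base + (size : Int) := by omega
      have hmid : PySem.Int.floordiv (base + (base + (size : Int))) 2 = base + ((size / 2 : Nat) : Int) := by
        have := PySem.Int.floordiv_eq_ediv_of_pos (a := base + (base + (size : Int))) (b := 2) (by omega)
        omega
      simp only [dif_pos hlt, if_neg hz, hmid]
      split
      · have harg : base + (size : Int) = (base + ((size / 2 : Nat) : Int) + 1) + ((size - size / 2 - 1 : Nat) : Int) := by omega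
        rw [harg]
        exact ih (size - size / 2 - 1) (by omega) (base + ((size / 2 : Nat) : Int) + 1)
      · exact ih (size / 2) (by omega) base

-- ===== VERDICT (by name: the statement is the Claim_ definition above) =====
theorem upper_spec : Claim_equal_upper := by
  intro arr target _
  unfold Spec_upper upper upper_alt
  have := upperLoop_eq_upperGo arr target arr.length 0
  simpa using this
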